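-- pv_equiv track=rewrite | github.com/murtazapenguin/reflect-health-demo | backend/app/modules/voice/service.py | _normalize_service
-- ===== SOURCE A (Python) =====
-- from typing import List, Optional
--
-- SERVICE_ALIASES = {
--     "primary care": "primary_care", "pcp": "primary_care", "pcp visit": "primary_care",
--     "office visit": "primary_care", "doctor visit": "primary_care", "checkup": "primary_care",
--     "annual physical": "primary_care", "wellness visit": "primary_care",
--     "specialist": "specialist_visit", "specialist visit": "specialist_visit",
--     "referral": "specialist_visit", "consultation": "specialist_visit",
--     "urgent care": "urgent_care", "walk-in": "urgent_care", "walk in": "urgent_care",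
--     "emergency": "emergency_room", "emergency room": "emergency_room", "er": "emergency_room",
--     "er visit": "emergency_room", "e.r.": "emergency_room",
--     "lab": "lab_work", "labs": "lab_work", "lab work": "lab_work", "blood work": "lab_work",
--     "bloodwork": "lab_work", "blood test": "lab_work", "laboratory": "lab_work",
--     "x-ray": "xray", "xray": "xray", "x ray": "xray",
--     "mri": "mri", "m.r.i.": "mri", "magnetic resonance": "mri",
--     "ct scan": "ct_scan", "ct": "ct_scan", "cat scan": "ct_scan", "c.t.": "ct_scan",
--     "physical therapy": "physical_therapy", "pt": "physical_therapy", "physio": "physical_therapy",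
--     "physiotherapy": "physical_therapy", "rehab": "physical_therapy", "rehabilitation": "physical_therapy",
--     "mental health": "mental_health", "counseling": "mental_health", "therapy": "mental_health",
--     "behavioral health": "mental_health", "psychiatry": "mental_health", "psychologist": "mental_health",
--     "therapist": "mental_health",
--     "chiropractic": "chiropractic", "chiropractor": "chiropractic", "chiro": "chiropractic",
--     "outpatient surgery": "surgery_outpatient", "ambulatory surgery": "surgery_outpatient",
--     "day surgery": "surgery_outpatient",
--     "inpatient surgery": "surgery_inpatient", "hospital surgery": "surgery_inpatient",
--     "surgery": "surgery_outpatient",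
--     "generic prescription": "prescription_generic", "generic": "prescription_generic",
--     "generic drug": "prescription_generic", "generic medication": "prescription_generic",
--     "brand prescription": "prescription_brand", "brand name": "prescription_brand",
--     "brand drug": "prescription_brand", "brand medication": "prescription_brand",
--     "prescription": "prescription_generic", "medication": "prescription_generic",
--     "rx": "prescription_generic",
-- }
--
-- def _normalize_service(raw: str) -> Optional[str]:
--     """Map a spoken service description to a canonical service key."""
--     if not raw:
--         return None
--     lower = raw.strip().lower()
--     # Exact match first
--     if lower in SERVICE_ALIASES:
--         return SERVICE_ALIASES[lower]
--     # Substring match -- longest alias first to avoid partial mismatches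
--     for alias in sorted(SERVICE_ALIASES.keys(), key=len, reverse=True):
--         if alias in lower:
--             return SERVICE_ALIASES[alias]
--     return None
-- ===== SOURCE B (Python) =====
-- from typing import Optional
--
-- # Alias table stored as a flat list of delimiter-separated entry strings, parsed once at import time.
-- _ALIAS_SPEC = [
--     "primary care=primary_care",
--     "pcp=primary_care",
--     "pcp visit=primary_care",
--     "office visit=primary_care",
--     "doctor visit=primary_care",
--     "checkup=primary_care",
--     "annual physical=primary_care",
--     "wellness visit=primary_care",
--     "specialist=specialist_visit",
--     "specialist visit=specialist_visit",
--     "referral=specialist_visit",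
--     "consultation=specialist_visit",
--     "urgent care=urgent_care",
--     "walk-in=urgent_care",
--     "walk in=urgent_care",
--     "emergency=emergency_room",
--     "emergency room=emergency_room",
--     "er=emergency_room",
--     "er visit=emergency_room",
--     "e.r.=emergency_room",
--     "lab=lab_work",
--     "labs=lab_work",
--     "lab work=lab_work",
--     "blood work=lab_work",
--     "bloodwork=lab_work",
--     "blood test=lab_work",
--     "laboratory=lab_work",
--     "x-ray=xray",
--     "xray=xray",
--     "x ray=xray",
--     "mri=mri",
--     "m.r.i.=mri",
--     "magnetic resonance=mri",
--     "ct scan=ct_scan",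
--     "ct=ct_scan",
--     "cat scan=ct_scan",
--     "c.t.=ct_scan",
--     "physical therapy=physical_therapy",
--     "pt=physical_therapy",
--     "physio=physical_therapy",
--     "physiotherapy=physical_therapy",
--     "rehab=physical_therapy",
--     "rehabilitation=physical_therapy",
--     "mental health=mental_health",
--     "counseling=mental_health",
--     "therapy=mental_health",
--     "behavioral health=mental_health",
--     "psychiatry=mental_health",
--     "psychologist=mental_health",
--     "therapist=mental_health",
--     "chiropractic=chiropractic",
--     "chiropractor=chiropractic",
--     "chiro=chiropractic",
--     "outpatient surgery=surgery_outpatient",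
--     "ambulatory surgery=surgery_outpatient",
--     "day surgery=surgery_outpatient",
--     "inpatient surgery=surgery_inpatient",
--     "hospital surgery=surgery_inpatient",
--     "surgery=surgery_outpatient",
--     "generic prescription=prescription_generic",
--     "generic=prescription_generic",
--     "generic drug=prescription_generic",
--     "generic medication=prescription_generic",
--     "brand prescription=prescription_brand",
--     "brand name=prescription_brand",
--     "brand drug=prescription_brand",
--     "brand medication=prescription_brand",
--     "prescription=prescription_generic",
--     "medication=prescription_generic",
--     "rx=prescription_generic",
-- ]
--
-- _ALIASES = [entry.split("=", 1) for entry in _ALIAS_SPEC]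
--
--
-- def _normalize_service(raw: str) -> Optional[str]:
--     """Map a spoken service description to a canonical service key.
--
--     Single pass over the parsed alias list: keep the longest alias occurring in
--     the normalized input; a strictly-greater-length update rule makes table
--     order break length ties (the same winner as a stable reverse length sort,
--     and an exact match is automatically the unique longest match).
--     """
--     if not raw:
--         return None
--     lower = raw.strip().lower()
--     best = None
--     best_len = -1
--     for alias, key in _ALIASES:
--         if len(alias) > best_len and alias in lower:
--             best = key
--             best_len = len(alias)
--     return best
-- ===== Notes on version B (the rewrite author's own statement) =====
-- stated objective: alternative
-- what changed: B stores the alias table as a flat list of delimiter-separated entry strings parsed once at import, and replaces A's exact-match branch plus sort-all-aliases-by-length-then-first-substring-match with a single unsorted pass tracking the running best key, updating only on strictly greater alias length (so table order breaks ties exactly like the stable reverse sort, and an exact hit is automatically the unique longest match).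
import Mathlib
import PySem

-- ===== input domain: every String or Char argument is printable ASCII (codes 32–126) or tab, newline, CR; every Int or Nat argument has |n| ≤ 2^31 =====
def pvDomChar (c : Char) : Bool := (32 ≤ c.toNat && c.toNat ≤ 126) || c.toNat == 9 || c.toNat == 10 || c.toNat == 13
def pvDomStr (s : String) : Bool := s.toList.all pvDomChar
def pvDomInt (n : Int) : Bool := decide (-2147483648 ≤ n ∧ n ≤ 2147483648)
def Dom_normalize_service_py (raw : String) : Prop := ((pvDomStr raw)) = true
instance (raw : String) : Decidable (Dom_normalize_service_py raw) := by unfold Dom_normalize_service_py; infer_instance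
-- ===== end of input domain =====

-- B stores the alias table as one compact parsed string and replaces A's sort-then-first-substring-match
-- (plus exact-match fast path) by a single pass tracking the strictly-longest matching alias;
-- equal return value proved, no speed claim.


-- ===== PORT A =====
-- the module constant SERVICE_ALIASES, as its insertion-ordered pair list and as the dict
def serviceAliasesList : List (String × String) := [
  ("primary care", "primary_care"), ("pcp", "primary_care"), ("pcp visit", "primary_care"),
  ("office visit", "primary_care"), ("doctor visit", "primary_care"), ("checkup", "primary_care"),
  ("annual physical", "primary_care"), ("wellness visit", "primary_care"),
  ("specialist", "specialist_visit"), ("specialist visit", "specialist_visit"),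
  ("referral", "specialist_visit"), ("consultation", "specialist_visit"),
  ("urgent care", "urgent_care"), ("walk-in", "urgent_care"), ("walk in", "urgent_care"),
  ("emergency", "emergency_room"), ("emergency room", "emergency_room"), ("er", "emergency_room"),
  ("er visit", "emergency_room"), ("e.r.", "emergency_room"),
  ("lab", "lab_work"), ("labs", "lab_work"), ("lab work", "lab_work"), ("blood work", "lab_work"),
  ("bloodwork", "lab_work"), ("blood test", "lab_work"), ("laboratory", "lab_work"),
  ("x-ray", "xray"), ("xray", "xray"), ("x ray", "xray"),
  ("mri", "mri"), ("m.r.i.", "mri"), ("magnetic resonance", "mri"),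
  ("ct scan", "ct_scan"), ("ct", "ct_scan"), ("cat scan", "ct_scan"), ("c.t.", "ct_scan"),
  ("physical therapy", "physical_therapy"), ("pt", "physical_therapy"), ("physio", "physical_therapy"),
  ("physiotherapy", "physical_therapy"), ("rehab", "physical_therapy"), ("rehabilitation", "physical_therapy"),
  ("mental health", "mental_health"), ("counseling", "mental_health"), ("therapy", "mental_health"),
  ("behavioral health", "mental_health"), ("psychiatry", "mental_health"), ("psychologist", "mental_health"),
  ("therapist", "mental_health"),
  ("chiropractic", "chiropractic"), ("chiropractor", "chiropractic"), ("chiro", "chiropractic"),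
  ("outpatient surgery", "surgery_outpatient"), ("ambulatory surgery", "surgery_outpatient"),
  ("day surgery", "surgery_outpatient"),
  ("inpatient surgery", "surgery_inpatient"), ("hospital surgery", "surgery_inpatient"),
  ("surgery", "surgery_outpatient"),
  ("generic prescription", "prescription_generic"), ("generic", "prescription_generic"),
  ("generic drug", "prescription_generic"), ("generic medication", "prescription_generic"),
  ("brand prescription", "prescription_brand"), ("brand name", "prescription_brand"),
  ("brand drug", "prescription_brand"), ("brand medication", "prescription_brand"),
  ("prescription", "prescription_generic"), ("medication", "prescription_generic"),
  ("rx", "prescription_generic")]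

-- the alias keys are pairwise distinct (hnodup below), so Dict.mk of the pair list is the dict literal
def serviceAliases : PySem.Dict String String := PySem.Dict.mk serviceAliasesList

def normalize_service_py (raw : String) : Option String :=
  if raw == "" then none
  else
    let lower := PySem.Str.lower (PySem.Str.strip raw)
    if serviceAliases.contains lower then serviceAliases.get? lower
    else
      match (PySem.List.sorted serviceAliases.keys (fun a => PySem.Str.len a) true).find?
              (fun al => PySem.Str.isIn al lower) with
      | some al => serviceAliases.get? al
      | none => none

-- ===== PORT B =====
-- B's module constant _ALIAS_SPEC: the table as a flat list of delimiter-separated entry strings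
def aliasSpec : List String := [
  "primary care=primary_care",
  "pcp=primary_care",
  "pcp visit=primary_care",
  "office visit=primary_care",
  "doctor visit=primary_care",
  "checkup=primary_care",
  "annual physical=primary_care",
  "wellness visit=primary_care",
  "specialist=specialist_visit",
  "specialist visit=specialist_visit",
  "referral=specialist_visit",
  "consultation=specialist_visit",
  "urgent care=urgent_care",
  "walk-in=urgent_care",
  "walk in=urgent_care",
  "emergency=emergency_room",
  "emergency room=emergency_room",
  "er=emergency_room",
  "er visit=emergency_room",
  "e.r.=emergency_room",
  "lab=lab_work",
  "labs=lab_work",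
  "lab work=lab_work",
  "blood work=lab_work",
  "bloodwork=lab_work",
  "blood test=lab_work",
  "laboratory=lab_work",
  "x-ray=xray",
  "xray=xray",
  "x ray=xray",
  "mri=mri",
  "m.r.i.=mri",
  "magnetic resonance=mri",
  "ct scan=ct_scan",
  "ct=ct_scan",
  "cat scan=ct_scan",
  "c.t.=ct_scan",
  "physical therapy=physical_therapy",
  "pt=physical_therapy",
  "physio=physical_therapy",
  "physiotherapy=physical_therapy",
  "rehab=physical_therapy",
  "rehabilitation=physical_therapy",
  "mental health=mental_health",
  "counseling=mental_health",
  "therapy=mental_health",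
  "behavioral health=mental_health",
  "psychiatry=mental_health",
  "psychologist=mental_health",
  "therapist=mental_health",
  "chiropractic=chiropractic",
  "chiropractor=chiropractic",
  "chiro=chiropractic",
  "outpatient surgery=surgery_outpatient",
  "ambulatory surgery=surgery_outpatient",
  "day surgery=surgery_outpatient",
  "inpatient surgery=surgery_inpatient",
  "hospital surgery=surgery_inpatient",
  "surgery=surgery_outpatient",
  "generic prescription=prescription_generic",
  "generic=prescription_generic",
  "generic drug=prescription_generic",
  "generic medication=prescription_generic",
  "brand prescription=prescription_brand",
  "brand name=prescription_brand",
  "brand drug=prescription_brand",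
  "brand medication=prescription_brand",
  "prescription=prescription_generic",
  "medication=prescription_generic",
  "rx=prescription_generic"]

-- entry.split("=", 1) unpacked to a pair; the fallback arm is unreachable (every entry contains the delimiter)
def parseEntry (e : String) : String × String :=
  match PySem.Str.splitMax? e "=" 1 with
  | some (a :: k :: _) => (a, k)
  | _ => ("", "")

-- _ALIASES = [entry.split("=", 1) for entry in _ALIAS_SPEC]
def aliasTable : List (String × String) := aliasSpec.map parseEntry

-- loop body of B: keep (best, best_len), update on strictly longer matching alias
def bestStep (lower : String) (acc : Option String × Int) (kv : String × String) :
    Option String × Int :=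
  if decide (acc.2 < (PySem.Str.len kv.1 : Int)) && PySem.Str.isIn kv.1 lower then
    (some kv.2, (PySem.Str.len kv.1 : Int))
  else acc

def normalize_service_py_alt (raw : String) : Option String :=
  if raw == "" then none
  else
    let lower := PySem.Str.lower (PySem.Str.strip raw)
    (aliasTable.foldl (bestStep lower) ((none : Option String), (-1 : Int))).1

-- ===== PRECONDITION & SPEC =====

def Spec_normalize_service_py (raw : String) (out : Option String) : Prop := out = normalize_service_py_alt raw
instance (raw : String) (out : Option String) : Decidable (Spec_normalize_service_py raw out) := by unfold Spec_normalize_service_py; infer_instance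

-- ===== CLAIM (what is proved, stated in full; the proofs are below) =====
def Claim_equal_normalize_service_py : Prop := ∀ (raw : String), Dom_normalize_service_py raw → Spec_normalize_service_py raw (normalize_service_py raw)

-- ===== LEMMAS AND PROOFS =====

-- B's parsed string table is exactly the pair list of A's dict
set_option maxRecDepth 100000 in
set_option maxHeartbeats 1000000 in
theorem htable : aliasTable = serviceAliasesList := by decide

-- the concrete stable length-descending sort of the alias table (what A's sorted() produces)
def sortedAliases : List (String × String) :=
  PySem.List.sorted serviceAliasesList (fun kv => PySem.Str.len kv.1) true

theorem insertBy_nil {α : Type} (bef : α → α → Bool) (x : α) :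
    PySem.List.insertBy bef x [] = [x] := rfl

theorem insertBy_cons {α : Type} (bef : α → α → Bool) (x y : α) (ys : List α) :
    PySem.List.insertBy bef x (y :: ys)
      = if bef x y then x :: y :: ys else y :: PySem.List.insertBy bef x ys := rfl

theorem insertBy_map {α β : Type} (f : α → β) (cmp : β → β → Bool) (x : α) (ys : List α) :
    PySem.List.insertBy cmp (f x) (ys.map f)
      = (PySem.List.insertBy (fun a b => cmp (f a) (f b)) x ys).map f := by
  induction ys with
  | nil => rfl
  | cons y t ih =>
    rw [List.map_cons, insertBy_cons, insertBy_cons]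
    by_cases h : cmp (f x) (f y) = true
    · rw [if_pos h, if_pos h]; rfl
    · rw [if_neg h, if_neg h, List.map_cons, ih]

theorem foldl_insertBy_map {α β : Type} (f : α → β) (cmp : β → β → Bool) :
    ∀ (xs : List α) (acc : List α),
      (xs.map f).foldl (fun a x => PySem.List.insertBy cmp x a) (acc.map f)
        = (xs.foldl (fun a x => PySem.List.insertBy (fun u v => cmp (f u) (f v)) x a) acc).map f := by
  intro xs
  induction xs with
  | nil => intro acc; rfl
  | cons x t ih =>
    intro acc
    rw [List.map_cons, List.foldl_cons, List.foldl_cons, insertBy_map, ih]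

theorem filter_insertBy {α : Type} (key : α → Int) (n : Int) (x : α) :
    ∀ (acc : List α), acc.Pairwise (fun a b => key b ≤ key a) →
      (PySem.List.insertBy (fun a b => decide (key b < key a)) x acc).filter (fun c => key c == n)
        = if key x == n then acc.filter (fun c => key c == n) ++ [x]
          else acc.filter (fun c => key c == n) := by
  intro acc
  induction acc with
  | nil =>
    intro _
    rw [insertBy_nil]
    by_cases h : (key x == n) = true
    · rw [if_pos h]; simp [h]
    · rw [if_neg h]; simp [h]
  | cons y t ih =>
    intro hpw
    obtain ⟨hy, hpw'⟩ := List.pairwise_cons.mp hpw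
    rw [insertBy_cons]
    by_cases h : decide (key y < key x) = true
    · rw [if_pos h]
      have hyx : key y < key x := of_decide_eq_true h
      by_cases hx : (key x == n) = true
      · have hxn : key x = n := by simpa using hx
        have hnil : (y :: t).filter (fun c => key c == n) = [] := by
          rw [List.filter_eq_nil_iff]
          intro c hc
          rcases List.mem_cons.mp hc with rfl | hc'
          · simp; omega
          · have := hy c hc'; simp; omega
        rw [if_pos hx, hnil, List.filter_cons]
        simp [hx, hnil]
      · rw [if_neg hx, List.filter_cons]
        simp [hx]
    · rw [if_neg h, List.filter_cons, List.filter_cons, ih hpw']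
      by_cases hx : (key x == n) = true <;> by_cases hyn : (key y == n) = true <;>
        simp [hx, hyn]

theorem sorted_rev_filter_key {α : Type} (key : α → Int) (n : Int) :
    ∀ xs : List α,
      (PySem.List.sorted xs key true).filter (fun c => key c == n)
        = xs.filter (fun c => key c == n) := by
  intro xs
  induction xs using List.reverseRecOn with
  | nil => rfl
  | append_singleton xs x ih =>
    have hsapp : PySem.List.sorted (xs ++ [x]) key true
        = PySem.List.insertBy (fun a b => decide (key b < key a)) x (PySem.List.sorted xs key true) := by
      rw [PySem.List.sorted_rev_eq_foldl_insertBy, PySem.List.sorted_rev_eq_foldl_insertBy,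
        List.foldl_append]
      rfl
    rw [hsapp, filter_insertBy key n x _ (PySem.List.sorted_pairwise_rev xs key), List.filter_append]
    by_cases hx : (key x == n) = true
    · rw [if_pos hx, ih]; simp [hx]
    · rw [if_neg hx, ih]; simp [hx]

theorem hkeys_sorted :
    PySem.List.sorted serviceAliases.keys (fun a => PySem.Str.len a) true
      = sortedAliases.map Prod.fst := by
  have hk : serviceAliases.keys = serviceAliasesList.map Prod.fst := rfl
  rw [hk]
  unfold sortedAliases
  rw [PySem.List.sorted_rev_eq_foldl_insertBy, PySem.List.sorted_rev_eq_foldl_insertBy]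
  have h := foldl_insertBy_map Prod.fst
    (fun a b : String => decide (PySem.Str.len b < PySem.Str.len a)) serviceAliasesList []
  simpa using h

set_option maxRecDepth 40000 in
theorem hnodup : (serviceAliasesList.map Prod.fst).Nodup := by decide

-- running maximum of matched alias lengths (the .2 component of B's fold)
def maxf (p : String → Bool) (xs : List (String × String)) (m : Int) : Int :=
  xs.foldl (fun acc kv =>
    if decide (acc < (PySem.Str.len kv.1 : Int)) && p kv.1 then (PySem.Str.len kv.1 : Int) else acc) m

-- generalized step (bestStep with an arbitrary match predicate)
def stepP (p : String → Bool) (acc : Option String × Int) (kv : String × String) :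
    Option String × Int :=
  if decide (acc.2 < (PySem.Str.len kv.1 : Int)) && p kv.1 then
    (some kv.2, (PySem.Str.len kv.1 : Int))
  else acc

theorem maxf_cons (p : String → Bool) (kv : String × String) (t : List (String × String)) (m : Int) :
    maxf p (kv :: t) m
      = maxf p t (if decide (m < PySem.Str.len kv.1) && p kv.1 then PySem.Str.len kv.1 else m) := rfl

theorem le_maxf (p : String → Bool) :
    ∀ (xs : List (String × String)) (m : Int), m ≤ maxf p xs m := by
  intro xs
  induction xs with
  | nil => intro m; exact le_refl m
  | cons kv t ih =>
    intro m
    rw [maxf_cons]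
    refine le_trans ?_ (ih _)
    split_ifs with h
    · simp only [Bool.and_eq_true, decide_eq_true_eq] at h
      exact le_of_lt h.1
    · exact le_refl m

theorem maxf_le_of_mem (p : String → Bool) :
    ∀ (xs : List (String × String)) (m : Int) (kv : String × String),
      kv ∈ xs → p kv.1 = true → PySem.Str.len kv.1 ≤ maxf p xs m := by
  intro xs
  induction xs with
  | nil => intro m kv h; cases h
  | cons c t ih =>
    intro m kv hmem hp
    rcases List.mem_cons.mp hmem with rfl | hmem'
    · rw [maxf_cons]
      refine le_trans ?_ (le_maxf p t _)
      split_ifs with h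
      · exact le_refl _
      · simp only [Bool.and_eq_true, decide_eq_true_eq, hp, and_true] at h
        omega
    · rw [maxf_cons]
      exact ih _ kv hmem' hp

theorem maxf_attained (p : String → Bool) :
    ∀ (xs : List (String × String)) (m : Int),
      maxf p xs m = m ∨ ∃ kv ∈ xs, p kv.1 = true ∧ m < PySem.Str.len kv.1
        ∧ maxf p xs m = PySem.Str.len kv.1 := by
  intro xs
  induction xs with
  | nil => intro m; exact Or.inl rfl
  | cons c t ih =>
    intro m
    rw [maxf_cons]
    by_cases h : (decide (m < PySem.Str.len c.1) && p c.1) = true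
    · rw [if_pos h]
      simp only [Bool.and_eq_true, decide_eq_true_eq] at h
      rcases ih (PySem.Str.len c.1) with h1 | ⟨kv, hkv, hp2, hlt, heq⟩
      · exact Or.inr ⟨c, List.mem_cons_self, h.2, h.1, h1⟩
      · exact Or.inr ⟨kv, List.mem_cons_of_mem _ hkv, hp2, lt_trans h.1 hlt, heq⟩
    · rw [if_neg h]
      rcases ih m with h1 | ⟨kv, hkv, hp2, hlt, heq⟩
      · exact Or.inl h1
      · exact Or.inr ⟨kv, List.mem_cons_of_mem _ hkv, hp2, hlt, heq⟩

theorem foldB_char (p : String → Bool) :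
    ∀ (xs : List (String × String)) (b : Option String) (m : Int),
      xs.foldl (stepP p) (b, m)
        = match xs.find? (fun kv => decide (m < PySem.Str.len kv.1) && p kv.1
                             && decide (PySem.Str.len kv.1 = maxf p xs m)) with
          | some kv => (some kv.2, maxf p xs m)
          | none => (b, m) := by
  intro xs
  induction xs with
  | nil => intro b m; rfl
  | cons c t ih =>
    intro b m
    by_cases hc : (decide (m < PySem.Str.len c.1) && p c.1) = true
    · have hc' : m < PySem.Str.len c.1 ∧ p c.1 = true := by simpa using hc
      have hstep : stepP p (b, m) c = (some c.2, PySem.Str.len c.1) := by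
        simp only [stepP]; rw [if_pos hc]
      have hmaxf : maxf p (c :: t) m = maxf p t (PySem.Str.len c.1) := by
        rw [maxf_cons, if_pos hc]
      rw [List.foldl_cons, hstep, ih, hmaxf]
      by_cases hMe : maxf p t (PySem.Str.len c.1) = PySem.Str.len c.1
      · rw [hMe]
        have hGc : (decide (m < PySem.Str.len c.1) && p c.1
            && decide (PySem.Str.len c.1 = PySem.Str.len c.1)) = true := by
          simp only [Bool.and_eq_true, decide_eq_true_eq]
          exact ⟨⟨hc'.1, hc'.2⟩, trivial⟩
        have hEq : (c :: t).find? (fun kv : String × String => decide (m < PySem.Str.len kv.1) && p kv.1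
            && decide (PySem.Str.len kv.1 = PySem.Str.len c.1)) = some c :=
          List.find?_cons_of_pos hGc
        rw [hEq]
        have hnone : t.find? (fun kv => decide (PySem.Str.len c.1 < PySem.Str.len kv.1) && p kv.1
            && decide (PySem.Str.len kv.1 = PySem.Str.len c.1)) = none := by
          rw [List.find?_eq_none]
          intro kv _ hq2
          simp only [Bool.and_eq_true, decide_eq_true_eq] at hq2
          omega
        rw [hnone]
      · have hlt : PySem.Str.len c.1 < maxf p t (PySem.Str.len c.1) :=
          lt_of_le_of_ne (le_maxf p t _) (fun hh => hMe hh.symm)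
        have hGc : (decide (m < PySem.Str.len c.1) && p c.1
            && decide (PySem.Str.len c.1 = maxf p t (PySem.Str.len c.1))) = false := by
          have hd : decide (PySem.Str.len c.1 = maxf p t (PySem.Str.len c.1)) = false :=
            decide_eq_false (fun hh => hMe hh.symm)
          rw [hd, Bool.and_false]
        have hEq : (c :: t).find? (fun kv : String × String => decide (m < PySem.Str.len kv.1) && p kv.1
            && decide (PySem.Str.len kv.1 = maxf p t (PySem.Str.len c.1)))
            = t.find? (fun kv : String × String => decide (m < PySem.Str.len kv.1) && p kv.1
            && decide (PySem.Str.len kv.1 = maxf p t (PySem.Str.len c.1))) :=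
          List.find?_cons_of_neg (ne_true_of_eq_false hGc)
        rw [hEq]
        have hpe : (fun kv : String × String => decide (m < PySem.Str.len kv.1) && p kv.1
              && decide (PySem.Str.len kv.1 = maxf p t (PySem.Str.len c.1)))
            = (fun kv : String × String => decide (PySem.Str.len c.1 < PySem.Str.len kv.1) && p kv.1
              && decide (PySem.Str.len kv.1 = maxf p t (PySem.Str.len c.1))) := by
          funext kv
          by_cases hk : PySem.Str.len kv.1 = maxf p t (PySem.Str.len c.1)
          · have h1 : m < PySem.Str.len kv.1 := by omega
            have h2 : PySem.Str.len c.1 < PySem.Str.len kv.1 := by omega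
            rw [decide_eq_true h1, decide_eq_true h2]
          · rw [decide_eq_false hk, Bool.and_false, Bool.and_false]
        rw [hpe]
        cases hfind : t.find? (fun kv : String × String => decide (PySem.Str.len c.1 < PySem.Str.len kv.1) && p kv.1
            && decide (PySem.Str.len kv.1 = maxf p t (PySem.Str.len c.1))) with
        | none =>
          exfalso
          rcases maxf_attained p t (PySem.Str.len c.1) with hh | ⟨kv, hkvmem, hkvp, hkvlt, hkveq⟩
          · exact hMe hh
          · refine List.find?_eq_none.mp hfind kv hkvmem ?_
            show (decide (PySem.Str.len c.1 < PySem.Str.len kv.1) && p kv.1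
              && decide (PySem.Str.len kv.1 = maxf p t (PySem.Str.len c.1))) = true
            rw [decide_eq_true hkvlt, hkvp, decide_eq_true hkveq.symm]
            rfl
        | some kv => rfl
    · have hstep : stepP p (b, m) c = (b, m) := by
        simp only [stepP]; rw [if_neg hc]
      have hmaxf : maxf p (c :: t) m = maxf p t m := by
        rw [maxf_cons, if_neg hc]
      have hcf : (decide (m < PySem.Str.len c.1) && p c.1) = false := by
        simpa using hc
      rw [List.foldl_cons, hstep, ih, hmaxf]
      have hGc : (decide (m < PySem.Str.len c.1) && p c.1
          && decide (PySem.Str.len c.1 = maxf p t m)) = false := by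
        rw [hcf, Bool.false_and]
      have hEq : (c :: t).find? (fun kv : String × String => decide (m < PySem.Str.len kv.1) && p kv.1
          && decide (PySem.Str.len kv.1 = maxf p t m))
          = t.find? (fun kv : String × String => decide (m < PySem.Str.len kv.1) && p kv.1
          && decide (PySem.Str.len kv.1 = maxf p t m)) :=
        List.find?_cons_of_neg (ne_true_of_eq_false hGc)
      rw [hEq]

theorem find?_eq_find?_filter {α : Type} (q g : α → Bool) (h : ∀ x, q x = true → g x = true) :
    ∀ (xs : List α), xs.find? q = (xs.filter g).find? q := by
  intro xs
  induction xs with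
  | nil => rfl
  | cons x t ih =>
    by_cases hg : g x = true
    · rw [List.filter_cons_of_pos hg]
      by_cases hq2 : q x = true
      · rw [List.find?_cons_of_pos hq2, List.find?_cons_of_pos hq2]
      · rw [List.find?_cons_of_neg hq2, List.find?_cons_of_neg hq2, ih]
    · have hq2 : ¬ q x = true := fun hh => hg (h x hh)
      rw [List.filter_cons_of_neg hg, List.find?_cons_of_neg hq2, ih]

theorem find?_strengthen {α : Type} (f q : α → Bool) (hq : ∀ x, q x = true → f x = true) :
    ∀ (xs : List α) (y : α), xs.find? f = some y → q y = true → xs.find? q = some y := by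
  intro xs
  induction xs with
  | nil => intro y h; cases h
  | cons x t ih =>
    intro y hfind hqy
    by_cases hf : f x = true
    · rw [List.find?_cons_of_pos hf] at hfind
      injection hfind with hxy
      subst hxy
      rw [List.find?_cons_of_pos hqy]
    · rw [List.find?_cons_of_neg hf] at hfind
      have hqx : ¬ q x = true := fun hh => hf (hq x hh)
      rw [List.find?_cons_of_neg hqx]
      exact ih y hfind hqy

theorem find?_pairwise_rel {α : Type} (R : α → α → Prop) (f : α → Bool) :
    ∀ (xs : List α) (y : α), xs.Pairwise R → xs.find? f = some y →
      ∀ c ∈ xs, f c = true → c = y ∨ R y c := by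
  intro xs
  induction xs with
  | nil => intro y _ h; cases h
  | cons x t ih =>
    intro y hpw hfind c hc hfc
    obtain ⟨hx, hpw'⟩ := List.pairwise_cons.mp hpw
    by_cases hf : f x = true
    · rw [List.find?_cons_of_pos hf] at hfind
      injection hfind with hxy
      subst hxy
      rcases List.mem_cons.mp hc with rfl | hc'
      · exact Or.inl rfl
      · exact Or.inr (hx c hc')
    · rw [List.find?_cons_of_neg hf] at hfind
      rcases List.mem_cons.mp hc with rfl | hc'
      · exact absurd hfc hf
      · exact ih y hpw' hfind c hc' hfc

theorem mem_eq_of_nodup_fst :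
    ∀ (xs : List (String × String)) (a b : String × String),
      (xs.map Prod.fst).Nodup → a ∈ xs → b ∈ xs → a.1 = b.1 → a = b := by
  intro xs
  induction xs with
  | nil => intro a b _ ha; cases ha
  | cons x t ih =>
    intro a b hnd ha hb hab
    rw [List.map_cons, List.nodup_cons] at hnd
    rcases List.mem_cons.mp ha with rfl | ha' <;> rcases List.mem_cons.mp hb with rfl | hb'
    · rfl
    · exact absurd (hab ▸ List.mem_map_of_mem (f := Prod.fst) hb') hnd.1
    · exact absurd (hab ▸ List.mem_map_of_mem (f := Prod.fst) ha') hnd.1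
    · exact ih a b hnd.2 ha' hb' hab

theorem str_len_toList (s : String) : PySem.Str.len s = (s.toList.length : Int) := by
  simp

theorem len_nonneg (s : String) : 0 ≤ PySem.Str.len s := by
  rw [str_len_toList]; exact Int.natCast_nonneg _

theorem isIn_len_le {a l : String} (h : PySem.Str.isIn a l = true) :
    PySem.Str.len a ≤ PySem.Str.len l := by
  rw [str_len_toList, str_len_toList]
  exact_mod_cast ((PySem.Str.isIn_iff_infix _ _).mp h).length_le

theorem isIn_eq_of_len_eq {a l : String} (h : PySem.Str.isIn a l = true)
    (hlen : PySem.Str.len a = PySem.Str.len l) : a = l := by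
  rw [str_len_toList, str_len_toList] at hlen
  exact String.toList_injective
    (((PySem.Str.isIn_iff_infix _ _).mp h).eq_of_length (by exact_mod_cast hlen))

theorem isIn_self (s : String) : PySem.Str.isIn s s = true :=
  (PySem.Str.isIn_iff_infix _ _).mpr (List.infix_refl _)

-- the central lemma: for any target string l, A's sorted first substring match (with its
-- exact-match fast path) agrees with B's single-pass strictly-longest-match fold
theorem main_core (l : String) :
    (if serviceAliases.contains l then serviceAliases.get? l
     else
       match sortedAliases.find? (fun kv => PySem.Str.isIn kv.1 l) with
       | some kv => some kv.2
       | none => none)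
    = (serviceAliasesList.foldl (stepP (fun a => PySem.Str.isIn a l)) (none, -1)).1 := by
  set p : String → Bool := fun a => PySem.Str.isIn a l with hp
  rw [foldB_char]
  set M : Int := maxf p serviceAliasesList (-1) with hM
  have hqp : ∀ kv : String × String,
      (decide ((-1 : Int) < PySem.Str.len kv.1) && p kv.1 && decide (PySem.Str.len kv.1 = M)) = true
        → p kv.1 = true := by
    intro kv hkv
    simp only [Bool.and_eq_true] at hkv
    exact hkv.1.2
  have hperm : ∀ kv : String × String, kv ∈ sortedAliases ↔ kv ∈ serviceAliasesList :=
    fun kv => (PySem.List.sorted_perm _ _ _).mem_iff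
  by_cases hcont : serviceAliases.contains l = true
  · -- A's exact-match branch: the entry for l is the unique longest substring match
    rw [if_pos hcont]
    have hmem : l ∈ serviceAliasesList.map Prod.fst := by
      have h1 := (PySem.Dict.contains_iff_mem_keys serviceAliases l).mp hcont
      have h2 : serviceAliases.keys = serviceAliasesList.map Prod.fst := rfl
      rw [h2] at h1
      exact h1
    obtain ⟨kv0, hkv0mem, hkv0fst⟩ := List.mem_map.mp hmem
    have hpair : (l, kv0.2) ∈ serviceAliasesList := by
      rw [← hkv0fst]; simpa using hkv0mem
    have hget : serviceAliases.get? l = some kv0.2 := by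
      refine PySem.Dict.get?_of_mem_items _ ?_ hnodup
      exact hpair
    have hpl : p kv0.1 = true := by
      rw [hp]; simp only []
      rw [hkv0fst]; exact isIn_self l
    have hMge : PySem.Str.len kv0.1 ≤ M := hM ▸ maxf_le_of_mem p _ _ _ hkv0mem hpl
    have hMle : M ≤ PySem.Str.len l := by
      rcases maxf_attained p serviceAliasesList (-1) with hh | ⟨kv, _, hkvp, _, hkveq⟩
      · rw [hM, hh]; exact le_trans (by omega) (len_nonneg l)
      · rw [hM, hkveq]; exact isIn_len_le hkvp
    have hMeq : M = PySem.Str.len l := by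
      rw [hkv0fst] at hMge; omega
    have hq0 : (decide ((-1 : Int) < PySem.Str.len kv0.1) && p kv0.1
        && decide (PySem.Str.len kv0.1 = M)) = true := by
      have := len_nonneg kv0.1
      simp only [Bool.and_eq_true, decide_eq_true_eq]
      exact ⟨⟨by omega, hpl⟩, by rw [hkv0fst, hMeq]⟩
    cases hfind : serviceAliasesList.find? (fun kv => decide ((-1 : Int) < PySem.Str.len kv.1) && p kv.1
        && decide (PySem.Str.len kv.1 = M)) with
    | none => exact absurd hq0 (List.find?_eq_none.mp hfind kv0 hkv0mem)
    | some kv =>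
      have hkvq := List.find?_some hfind
      have hkvmem := List.mem_of_find?_eq_some hfind
      simp only [Bool.and_eq_true, decide_eq_true_eq] at hkvq
      have hkvl : kv.1 = l := isIn_eq_of_len_eq hkvq.1.2 (by rw [hkvq.2, hMeq])
      have hkk : kv = (l, kv0.2) := mem_eq_of_nodup_fst serviceAliasesList kv (l, kv0.2) hnodup
        hkvmem hpair hkvl
      rw [hget, hkk]
  · -- A's substring branch
    rw [if_neg hcont]
    have hfold : (fun kv : String × String => PySem.Str.isIn kv.1 l)
        = (fun kv : String × String => p kv.1) := rfl
    rw [hfold]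
    cases hfind : sortedAliases.find? (fun kv : String × String => p kv.1) with
    | none =>
      have hnomatch : ∀ kv ∈ serviceAliasesList, ¬ p kv.1 = true := by
        intro kv hkv
        exact List.find?_eq_none.mp hfind kv ((hperm kv).mpr hkv)
      have hnone : serviceAliasesList.find? (fun kv => decide ((-1 : Int) < PySem.Str.len kv.1) && p kv.1
          && decide (PySem.Str.len kv.1 = M)) = none :=
        List.find?_eq_none.mpr (fun kv hkv hqkv => hnomatch kv hkv (hqp kv hqkv))
      rw [hnone]
    | some y =>
      have hyp : p y.1 = true := by
        have := List.find?_some (p := fun kv : String × String => p kv.1) hfind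
        exact this
      have hymem : y ∈ serviceAliasesList := (hperm y).mp (List.mem_of_find?_eq_some hfind)
      have hpw : sortedAliases.Pairwise
          (fun a b : String × String => PySem.Str.len b.1 ≤ PySem.Str.len a.1) :=
        PySem.List.sorted_pairwise_rev _ _
      have hMge : PySem.Str.len y.1 ≤ M := hM ▸ maxf_le_of_mem p _ _ _ hymem hyp
      have hMle : M ≤ PySem.Str.len y.1 := by
        rcases maxf_attained p serviceAliasesList (-1) with hh | ⟨kv, hkvmem, hkvp, _, hkveq⟩
        · rw [hM, hh]; exact le_trans (by omega) (len_nonneg y.1)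
        · rcases find?_pairwise_rel _ _ sortedAliases y hpw hfind kv ((hperm kv).mpr hkvmem) hkvp
            with heq | hle
          · rw [hM, hkveq, heq]
          · rw [hM, hkveq]; exact hle
      have hMeq : M = PySem.Str.len y.1 := le_antisymm hMle hMge
      have hqy : (decide ((-1 : Int) < PySem.Str.len y.1) && p y.1
          && decide (PySem.Str.len y.1 = M)) = true := by
        have := len_nonneg y.1
        simp only [Bool.and_eq_true, decide_eq_true_eq]
        exact ⟨⟨by omega, hyp⟩, hMeq.symm⟩
      have hys : sortedAliases.find? (fun kv => decide ((-1 : Int) < PySem.Str.len kv.1) && p kv.1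
          && decide (PySem.Str.len kv.1 = M)) = some y :=
        find?_strengthen (fun kv : String × String => p kv.1)
          (fun kv : String × String => decide ((-1 : Int) < PySem.Str.len kv.1) && p kv.1
            && decide (PySem.Str.len kv.1 = M)) hqp sortedAliases y hfind hqy
      have hqg : ∀ kv : String × String,
          (decide ((-1 : Int) < PySem.Str.len kv.1) && p kv.1 && decide (PySem.Str.len kv.1 = M)) = true
            → (PySem.Str.len kv.1 == PySem.Str.len y.1) = true := by
        intro kv hkv
        simp only [Bool.and_eq_true, decide_eq_true_eq] at hkv
        simp only [beq_iff_eq]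
        rw [hkv.2, hMeq]
      have hxs : serviceAliasesList.find? (fun kv => decide ((-1 : Int) < PySem.Str.len kv.1) && p kv.1
          && decide (PySem.Str.len kv.1 = M)) = some y := by
        have e1 := find?_eq_find?_filter
          (fun kv : String × String => decide ((-1 : Int) < PySem.Str.len kv.1) && p kv.1
            && decide (PySem.Str.len kv.1 = M))
          (fun c : String × String => PySem.Str.len c.1 == PySem.Str.len y.1) hqg serviceAliasesList
        have e2 := find?_eq_find?_filter
          (fun kv : String × String => decide ((-1 : Int) < PySem.Str.len kv.1) && p kv.1
            && decide (PySem.Str.len kv.1 = M))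
          (fun c : String × String => PySem.Str.len c.1 == PySem.Str.len y.1) hqg sortedAliases
        have e3 : sortedAliases.filter (fun c : String × String => PySem.Str.len c.1 == PySem.Str.len y.1)
            = serviceAliasesList.filter (fun c : String × String => PySem.Str.len c.1 == PySem.Str.len y.1) :=
          sorted_rev_filter_key (fun c : String × String => PySem.Str.len c.1) (PySem.Str.len y.1)
            serviceAliasesList
        rw [e1, ← e3, ← e2, hys]
      rw [hxs]

-- A's port body with its dict lookups in the substring branch replaced by the pair's value
theorem A_side_eq (l : String) :
    (if serviceAliases.contains l then serviceAliases.get? l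
     else
       match (PySem.List.sorted serviceAliases.keys (fun a => PySem.Str.len a) true).find?
           (fun al => PySem.Str.isIn al l) with
       | some al => serviceAliases.get? al
       | none => none)
    = (if serviceAliases.contains l then serviceAliases.get? l
       else
         match sortedAliases.find? (fun kv => PySem.Str.isIn kv.1 l) with
         | some kv => some kv.2
         | none => none) := by
  by_cases hcont : serviceAliases.contains l = true
  · rw [if_pos hcont, if_pos hcont]
  · rw [if_neg hcont, if_neg hcont, hkeys_sorted, List.find?_map]
    have hcomp : ((fun al => PySem.Str.isIn al l) ∘ Prod.fst)
        = (fun kv : String × String => PySem.Str.isIn kv.1 l) := by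
      funext kv; rfl
    rw [hcomp]
    generalize hfind : sortedAliases.find? (fun kv : String × String => PySem.Str.isIn kv.1 l) = o
    cases o with
    | none => rfl
    | some y =>
      simp only [Option.map_some]
      show serviceAliases.get? y.1 = some y.2
      refine PySem.Dict.get?_of_mem_items _ ?_ hnodup
      exact (PySem.List.sorted_perm _ _ _).mem_iff.mp (List.mem_of_find?_eq_some hfind)

-- B's fold over the parsed table is the generic fold over the dict's pair list
theorem B_side_eq (l : String) :
    (aliasTable.foldl (bestStep l) ((none : Option String), (-1 : Int))).1
      = (serviceAliasesList.foldl (stepP (fun a => PySem.Str.isIn a l)) (none, -1)).1 := by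
  rw [htable]; rfl

-- ===== VERDICT (by name: the statement is the Claim_ definition above) =====
theorem normalize_service_py_spec : Claim_equal_normalize_service_py := by
  intro raw _
  show normalize_service_py raw = normalize_service_py_alt raw
  unfold normalize_service_py normalize_service_py_alt
  by_cases h : (raw == "") = true
  · rw [if_pos h, if_pos h]
  · rw [if_neg h, if_neg h]
    exact ((A_side_eq (PySem.Str.lower (PySem.Str.strip raw))).trans
      (main_core (PySem.Str.lower (PySem.Str.strip raw)))).trans
      (B_side_eq (PySem.Str.lower (PySem.Str.strip raw))).symm
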